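-- pv_equiv track=rewrite | github.com/khgiddon/misc | riddler_2021_10_01_notebook.py | check_equal_north_south
-- ===== SOURCE A (Python) =====
-- def check_equal_north_south(s):
--     """
--     Each ranger should spend as many weeks in the north as they do in the south.
--     """
--     for ranger in range(1, 5):
--         weeks_n = 0
--         for week in s:
--             if ranger in week[0]:
--                 weeks_n += 1
--             else:
--                 weeks_n -= 1
--         if weeks_n != 0:
--             return False
--     return True
-- ===== SOURCE B (Python) =====
-- def check_equal_north_south(s):
--     # Single pass over the weeks, tallying all four rangers at once.
--     c1 = c2 = c3 = c4 = 0
--     total = len(s)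
--     for week in s:
--         north = week[0]
--         if 1 in north:
--             c1 += 1
--         if 2 in north:
--             c2 += 1
--         if 3 in north:
--             c3 += 1
--         if 4 in north:
--             c4 += 1
--     return 2 * c1 == total and 2 * c2 == total and 2 * c3 == total and 2 * c4 == total
-- ===== Notes on version B (the rewrite author's own statement) =====
-- stated objective: alternative
-- what changed: One pass over the weeks building all four rangers' north-counts at once, then checking 2*count == total per ranger, instead of re-scanning the whole week list once per ranger with a +1/-1 balance and early return.
import Mathlib
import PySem

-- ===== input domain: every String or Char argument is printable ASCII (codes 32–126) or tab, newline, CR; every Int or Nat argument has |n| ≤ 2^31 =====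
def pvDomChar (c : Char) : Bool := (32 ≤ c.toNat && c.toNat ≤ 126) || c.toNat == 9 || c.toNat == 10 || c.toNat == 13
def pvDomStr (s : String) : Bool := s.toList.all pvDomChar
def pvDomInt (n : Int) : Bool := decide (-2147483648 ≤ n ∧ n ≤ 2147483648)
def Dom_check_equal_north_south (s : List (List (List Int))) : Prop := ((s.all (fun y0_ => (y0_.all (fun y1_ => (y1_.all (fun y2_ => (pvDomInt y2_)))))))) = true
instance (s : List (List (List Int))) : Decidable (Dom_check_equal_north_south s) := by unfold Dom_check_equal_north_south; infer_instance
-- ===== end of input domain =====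

-- B replaces A's four rescans of the week list (one per ranger, with a +1/-1 balance)
-- by ONE pass tallying all four rangers' north-counts, then checks 2*count == total.

-- ===== PORT A =====
-- inner loop: weeks_n balance for one ranger (week[0] ported with pyGet?; Pre_ excludes empty weeks, where Python raises IndexError)
def pvABal (r : Int) (s : List (List (List Int))) : Int :=
  s.foldl (fun acc week => if ((PySem.List.pyGet? week 0).getD []).contains r then acc + 1 else acc - 1) 0

-- outer loop over range(1,5) with early return False
def pvALoop : List Int → List (List (List Int)) → Bool
  | [], _ => true
  | r :: rs, s => if pvABal r s ≠ 0 then false else pvALoop rs s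

def check_equal_north_south (s : List (List (List Int))) : Bool :=
  pvALoop (PySem.List.pyRange 1 5 1) s

-- ===== PORT B =====
def check_equal_north_south_alt (s : List (List (List Int))) : Bool :=
  let c := s.foldl (fun (c : Int × Int × Int × Int) week =>
      let north := (PySem.List.pyGet? week 0).getD []
      let c1 := if north.contains (1 : Int) then c.1 + 1 else c.1
      let c2 := if north.contains (2 : Int) then c.2.1 + 1 else c.2.1
      let c3 := if north.contains (3 : Int) then c.2.2.1 + 1 else c.2.2.1
      let c4 := if north.contains (4 : Int) then c.2.2.2 + 1 else c.2.2.2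
      (c1, c2, c3, c4)) (0, 0, 0, 0)
  let total : Int := s.length
  2 * c.1 == total && (2 * c.2.1 == total && (2 * c.2.2.1 == total && 2 * c.2.2.2 == total))

-- ===== PRECONDITION & SPEC =====
-- Pre_ excludes inputs containing an empty week, on which Python A raises IndexError at week[0] (B raises there too).
def Pre_check_equal_north_south (s : List (List (List Int))) : Prop := ∀ w ∈ s, w ≠ []
instance (s : List (List (List Int))) : Decidable (Pre_check_equal_north_south s) := by unfold Pre_check_equal_north_south; infer_instance
def pvWitness_check_equal_north_south : List (List (List Int)) := [[[1, 2]], [[3, 4]]]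

def Spec_check_equal_north_south (s : List (List (List Int))) (out : Bool) : Prop := out = check_equal_north_south_alt s
instance (s : List (List (List Int))) (out : Bool) : Decidable (Spec_check_equal_north_south s out) := by unfold Spec_check_equal_north_south; infer_instance

-- ===== CLAIM =====
def Claim_equal_check_equal_north_south : Prop := ∀ (s : List (List (List Int))), Dom_check_equal_north_south s → Pre_check_equal_north_south s → Spec_check_equal_north_south s (check_equal_north_south s)

-- ===== LEMMAS AND PROOFS =====

-- single-ranger count, the r-th component of B's tuple fold
def pvCnt (r : Int) (s : List (List (List Int))) (c : Int) : Int :=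
  s.foldl (fun c week => if ((PySem.List.pyGet? week 0).getD []).contains r then c + 1 else c) c

theorem pvCnt_shift (r : Int) (s : List (List (List Int))) (c : Int) :
    pvCnt r s c = c + pvCnt r s 0 := by
  induction s generalizing c with
  | nil => simp [pvCnt]
  | cons w t ih =>
    simp only [pvCnt, List.foldl_cons] at *
    rw [ih, ih (c := if ((PySem.List.pyGet? w 0).getD []).contains r then 0 + 1 else 0)]
    split_ifs <;> ring

theorem pvABal_shift (r : Int) (s : List (List (List Int))) (a : Int) :
    s.foldl (fun acc week => if ((PySem.List.pyGet? week 0).getD []).contains r then acc + 1 else acc - 1) a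
      = a + s.foldl (fun acc week => if ((PySem.List.pyGet? week 0).getD []).contains r then acc + 1 else acc - 1) 0 := by
  induction s generalizing a with
  | nil => simp
  | cons w t ih =>
    simp only [List.foldl_cons]
    rw [ih, ih (a := if ((PySem.List.pyGet? w 0).getD []).contains r then 0 + 1 else 0 - 1)]
    split_ifs <;> ring

theorem pvABal_eq (r : Int) (s : List (List (List Int))) :
    pvABal r s = 2 * pvCnt r s 0 - s.length := by
  induction s with
  | nil => simp [pvABal, pvCnt]
  | cons w t ih =>
    simp only [pvABal, pvCnt, List.foldl_cons, List.length_cons] at *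
    rw [pvABal_shift]
    have hc := pvCnt_shift r t (if ((PySem.List.pyGet? w 0).getD []).contains r then 0 + 1 else 0)
    simp only [pvCnt] at hc
    rw [hc]
    by_cases h : ((PySem.List.pyGet? w 0).getD []).contains r <;> simp only [h, if_true] <;>
      push_cast <;> omega

theorem pvTuple_fold (s : List (List (List Int))) (c : Int × Int × Int × Int) :
    s.foldl (fun (c : Int × Int × Int × Int) week =>
      let north := (PySem.List.pyGet? week 0).getD []
      let c1 := if north.contains (1 : Int) then c.1 + 1 else c.1
      let c2 := if north.contains (2 : Int) then c.2.1 + 1 else c.2.1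
      let c3 := if north.contains (3 : Int) then c.2.2.1 + 1 else c.2.2.1
      let c4 := if north.contains (4 : Int) then c.2.2.2 + 1 else c.2.2.2
      (c1, c2, c3, c4)) c
    = (pvCnt 1 s c.1, pvCnt 2 s c.2.1, pvCnt 3 s c.2.2.1, pvCnt 4 s c.2.2.2) := by
  induction s generalizing c with
  | nil => simp [pvCnt]
  | cons w t ih =>
    simp only [List.foldl_cons]
    rw [ih]
    simp [pvCnt, List.foldl_cons]

theorem pvALoop_all (rs : List Int) (s : List (List (List Int))) :
    pvALoop rs s = rs.all (fun r => pvABal r s == 0) := by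
  induction rs with
  | nil => simp [pvALoop]
  | cons r rs ih =>
    simp only [pvALoop, List.all_cons, ih]
    by_cases h : pvABal r s = 0 <;> simp [h]

theorem pvBeq_shift (c t : Int) : ((2 * c - t : Int) == 0) = (2 * c == t) := by
  by_cases h : (2 * c : Int) = t <;> simp [h] <;> omega

-- ===== VERDICT =====
theorem check_equal_north_south_spec : Claim_equal_check_equal_north_south := by
  intro s _ _
  unfold Spec_check_equal_north_south check_equal_north_south check_equal_north_south_alt
  have hr : PySem.List.pyRange 1 5 1 = [1, 2, 3, 4] := by decide
  rw [hr, pvALoop_all, pvTuple_fold]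
  simp only [List.all_cons, List.all_nil, pvABal_eq, pvBeq_shift, Bool.and_true]
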